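-- pv_equiv track=rewrite | github.com/lodre/Pakulnevitch_Kostia | Учебный год 2020-21/Работа на уроке/Работа на уроке 2021.03.29/n2.py | parse
-- ===== SOURCE A (Python) =====
-- def parse(s):
-- 	pos = 0
-- 	len = 0
-- 	count = 0
-- 	for x in s:
-- 		if ('0'<=x)&(x<='9'):
-- 			if pos == 0:
-- 				pos = 1
-- 				len = len+1
-- 				count = count + 1
-- 			else:
-- 				len = len + 1
-- 		else:
-- 			pos = 0
-- 	return (len,count)
-- ===== SOURCE B (Python) =====
-- def parse(s):
--     # Extract the maximal digit runs first, then derive both counts from them.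
--     runs = []
--     i = 0
--     n = len(s)
--     while i < n:
--         if '0' <= s[i] <= '9':
--             j = i
--             while j < n and '0' <= s[j] <= '9':
--                 j += 1
--             runs.append(j - i)
--             i = j
--         else:
--             i += 1
--     return (sum(runs), len(runs))
-- ===== Notes on version B (the rewrite author's own statement) =====
-- stated objective: alternative
-- what changed: B extracts the list of maximal digit-run lengths first (run-by-run scan with an inner skip loop) and derives the pair as (sum(runs), len(runs)), instead of A's single-pass flag/counter state machine.
import Mathlib
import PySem

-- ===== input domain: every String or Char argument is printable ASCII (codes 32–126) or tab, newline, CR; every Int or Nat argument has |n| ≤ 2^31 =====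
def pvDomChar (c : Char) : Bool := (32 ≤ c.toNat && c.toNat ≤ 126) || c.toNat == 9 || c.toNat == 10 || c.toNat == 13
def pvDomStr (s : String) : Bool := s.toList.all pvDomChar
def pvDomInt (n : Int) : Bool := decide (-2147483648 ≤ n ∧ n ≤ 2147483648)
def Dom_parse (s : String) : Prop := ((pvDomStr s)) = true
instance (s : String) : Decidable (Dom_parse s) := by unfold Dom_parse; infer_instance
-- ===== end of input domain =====

-- B is an alternative same-cost algorithm: it extracts the maximal digit runs first,
-- then derives (total digits, number of runs); A is a single-pass flag state machine.

-- ===== PORT A =====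
-- the loop body of A's for-loop, state = (pos, len, count)
def parseStep (st : Int × Int × Int) (x : Char) : Int × Int × Int :=
  if ('0' ≤ x) && (x ≤ '9') then
    if st.1 == 0 then (1, st.2.1 + 1, st.2.2 + 1)
    else (st.1, st.2.1 + 1, st.2.2)
  else (0, st.2.1, st.2.2)

def parse (s : String) : Int × Int :=
  let st := s.toList.foldl parseStep (0, 0, 0)
  (st.2.1, st.2.2)

-- ===== PORT B =====
-- B's outer while loop: advance over non-digits; on a digit, the inner while loop
-- (takeWhile/dropWhile) measures the maximal run, which is appended to the run list.
def parseRuns : List Char → List Int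
  | [] => []
  | c :: t =>
    if ('0' ≤ c) && (c ≤ '9') then
      ((1 : Int) + (t.takeWhile (fun d => ('0' ≤ d) && (d ≤ '9'))).length)
        :: parseRuns (t.dropWhile (fun d => ('0' ≤ d) && (d ≤ '9')))
    else parseRuns t
termination_by l => l.length
decreasing_by
  · exact Nat.lt_succ_of_le (List.length_dropWhile_le _ _)
  · exact Nat.lt_succ_self _

def parse_alt (s : String) : Int × Int :=
  let runs := parseRuns s.toList
  (runs.sum, (runs.length : Int))

-- ===== PRECONDITION & SPEC =====
def Spec_parse (s : String) (out : Int × Int) : Prop := out = parse_alt s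
instance (s : String) (out : Int × Int) : Decidable (Spec_parse s out) := by unfold Spec_parse; infer_instance

-- ===== CLAIM (what is proved, stated in full; the proofs are below) =====
def Claim_equal_parse : Prop := ∀ (s : String), Dom_parse s → Spec_parse s (parse s)

-- ===== LEMMAS AND PROOFS =====

lemma foldA_pos1 (t : List Char) (len count : Int) :
    (t.foldl parseStep (1, len, count)).2
      = ((t.dropWhile (fun d => ('0' ≤ d) && (d ≤ '9'))).foldl parseStep
          (0, len + (t.takeWhile (fun d => ('0' ≤ d) && (d ≤ '9'))).length, count)).2 := by
  induction t generalizing len count with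
  | nil => simp
  | cons c t ih =>
    by_cases h : (('0' ≤ c) && (c ≤ '9')) = true
    · simp only [List.foldl, parseStep, h, if_true, List.takeWhile, List.dropWhile,
        show ((1 : Int) == 0) = false from rfl, if_false, Bool.false_eq_true]
      rw [ih]
      congr 3
      simp only [List.length_cons, Prod.mk.injEq]
      push_cast
      exact And.intro (by ring) trivial
    · simp [List.foldl, parseStep, h, List.takeWhile, List.dropWhile]

lemma foldA_pos0 (t : List Char) (len count : Int) :
    (t.foldl parseStep (0, len, count)).2
      = (len + (parseRuns t).sum, count + (parseRuns t).length) := by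
  induction hn : t.length using Nat.strong_induction_on generalizing t len count with
  | _ n ih =>
    match t with
    | [] => simp [parseRuns]
    | c :: t =>
      by_cases h : (('0' ≤ c) && (c ≤ '9')) = true
      · rw [parseRuns]
        simp only [h, if_true]
        have hd : (t.dropWhile (fun d => ('0' ≤ d) && (d ≤ '9'))).length < n := by
          subst hn
          exact Nat.lt_succ_of_le (List.length_dropWhile_le _ _)
        simp only [List.foldl, parseStep, h, if_true,
          show ((0 : Int) == 0) = true from rfl]
        rw [foldA_pos1,
          ih _ hd (t.dropWhile (fun d => ('0' ≤ d) && (d ≤ '9')))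
            (len + 1 + (t.takeWhile (fun d => ('0' ≤ d) && (d ≤ '9'))).length) (count + 1) rfl]
        simp only [List.sum_cons, List.length_cons, Prod.mk.injEq]
        exact ⟨by ring, by push_cast; ring⟩
      · rw [parseRuns]
        simp only [h, if_false, Bool.false_eq_true]
        have ht : t.length < n := by subst hn; exact Nat.lt_succ_self _
        simp only [List.foldl, parseStep, h, if_false, Bool.false_eq_true]
        exact ih _ (by subst hn; exact Nat.lt_succ_self _) t len count rfl

-- ===== VERDICT (by name: the statement is the Claim_ definition above) =====
theorem parse_spec : Claim_equal_parse := by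
  intro s _
  unfold Spec_parse parse parse_alt
  have h := foldA_pos0 s.toList 0 0
  simp only [Prod.ext_iff] at h ⊢
  simp [h.1, h.2]
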